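-- pv_equiv track=rewrite | github.com/alexandre-piedade-ramos/advent_of_code | 2024/day21/d21p2.py | simN
-- ===== SOURCE A (Python) =====
-- def simN(y,x,moves):
--     nmap={'7':(0,0),'8':(0,1),'9':(0,2),'4':(1,0),'5':(1,1),'6':(1,2),'1':(2,0),'2':(2,1), '3':(2,2),'0':(3,1),'A':(3,2),None:(3,0)}
--     dirs={'^':(-1,0), '>':(0,1),'v':(1,0),'<':(0,-1)}
--     for e in moves:
--         dy,dx=dirs[e]
--         y,x=y+dy,x+dx
--         if nmap[None]==(y,x): return False
--     return True
-- ===== SOURCE B (Python) =====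
-- def simN(y, x, moves):
--     dirs = {'^': (-1, 0), '>': (0, 1), 'v': (1, 0), '<': (0, -1)}
--     # build the full list of successive positions (excluding the start), then scan
--     path = []
--     for e in moves:
--         dy, dx = dirs[e]
--         y, x = y + dy, x + dx
--         path.append((y, x))
--     return (3, 0) not in path
-- ===== Notes on version B (the rewrite author's own statement) =====
-- stated objective: alternative
-- what changed: A checks the forbidden cell incrementally with an early return inside the walk; B first builds the full list of successive positions and then answers with a single membership test on that path.
import Mathlib
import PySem

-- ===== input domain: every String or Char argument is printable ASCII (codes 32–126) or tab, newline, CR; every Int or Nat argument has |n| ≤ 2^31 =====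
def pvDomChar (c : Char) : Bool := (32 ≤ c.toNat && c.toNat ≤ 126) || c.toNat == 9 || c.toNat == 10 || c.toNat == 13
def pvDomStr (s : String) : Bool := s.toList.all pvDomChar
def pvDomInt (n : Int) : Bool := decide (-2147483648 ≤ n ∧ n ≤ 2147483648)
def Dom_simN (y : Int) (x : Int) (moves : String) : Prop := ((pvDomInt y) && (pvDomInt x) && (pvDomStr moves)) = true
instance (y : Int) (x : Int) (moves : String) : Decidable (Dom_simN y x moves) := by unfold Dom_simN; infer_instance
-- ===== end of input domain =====

-- B builds the full path of successive positions and then does one membership test,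
-- where A checks each step incrementally with an early return (alternative decomposition).

-- ===== PORT A =====
-- dirs[e]; under Pre_simN every move character is a key, so the KeyError branch is unreachable
def dirsA (c : Char) : Int × Int :=
  if c = '^' then (-1, 0)
  else if c = '>' then (0, 1)
  else if c = 'v' then (1, 0)
  else if c = '<' then (0, -1)
  else (0, 0)

-- the for-loop of A with its early `return False`
def simN_go (y x : Int) : List Char → Bool
  | [] => true
  | e :: rest =>
    let d := dirsA e
    let y' := y + d.1
    let x' := x + d.2
    if ((3 : Int), (0 : Int)) = (y', x') then false else simN_go y' x' rest

def simN (y : Int) (x : Int) (moves : String) : Bool :=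
  simN_go y x moves.toList

-- ===== PORT B =====
-- the dirs dict of Source B; under Pre_simN every lookup hits a key, default unreachable
def dirsBD : PySem.Dict Char (Int × Int) :=
  PySem.Dict.ofList [('^', (-1, 0)), ('>', (0, 1)), ('v', (1, 0)), ('<', (0, -1))]

-- the path-building loop of B: successive positions after each move (start excluded)
def simN_path (y x : Int) : List Char → List (Int × Int)
  | [] => []
  | e :: rest =>
    let d := dirsBD.getD e (0, 0)
    (y + d.1, x + d.2) :: simN_path (y + d.1) (x + d.2) rest

def simN_alt (y : Int) (x : Int) (moves : String) : Bool :=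
  !((simN_path y x moves.toList).contains ((3 : Int), (0 : Int)))

-- ===== PRECONDITION & SPEC =====
-- Pre_ excludes exactly the inputs where `moves` contains a character that is not a key
-- of `dirs`, on which Python A (and B alike) raises KeyError.
def Pre_simN (y : Int) (x : Int) (moves : String) : Prop :=
  (moves.toList.all (fun c => c == '^' || c == '>' || c == 'v' || c == '<')) = true
instance (y : Int) (x : Int) (moves : String) : Decidable (Pre_simN y x moves) := by
  unfold Pre_simN; infer_instance

def pvWitness_simN : Int × Int × String := (3, 2, "<^^<")

def Spec_simN (y : Int) (x : Int) (moves : String) (out : Bool) : Prop := out = simN_alt y x moves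
instance (y : Int) (x : Int) (moves : String) (out : Bool) : Decidable (Spec_simN y x moves out) := by unfold Spec_simN; infer_instance

-- ===== CLAIM (what is proved, stated in full; the proofs are below) =====
def Claim_equal_simN : Prop := ∀ (y : Int) (x : Int) (moves : String), Dom_simN y x moves → Pre_simN y x moves → Spec_simN y x moves (simN y x moves)

-- ===== LEMMAS AND PROOFS =====

theorem simN_go_eq_path (cs : List Char) : ∀ (y x : Int),
    (∀ c ∈ cs, c = '^' ∨ c = '>' ∨ c = 'v' ∨ c = '<') →
    simN_go y x cs = !((simN_path y x cs).contains ((3 : Int), (0 : Int))) := by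
  induction cs with
  | nil => intro y x _; rfl
  | cons e rest ih =>
    intro y x hpre
    have hd : dirsBD.getD e ((0:Int), (0:Int)) = dirsA e := by
      rcases hpre e (by simp) with h1 | h1 | h1 | h1 <;> subst h1 <;> decide
    have hrest : ∀ c ∈ rest, c = '^' ∨ c = '>' ∨ c = 'v' ∨ c = '<' :=
      fun c hc => hpre c (List.mem_cons_of_mem _ hc)
    by_cases h : ((3 : Int), (0 : Int)) = (y + (dirsA e).1, x + (dirsA e).2)
    · simp [simN_go, simN_path, hd, ← h]
    · simp [simN_go, simN_path, hd, h, ih _ _ hrest]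

-- ===== VERDICT (by name: the statement is the Claim_ definition above) =====
theorem simN_spec : Claim_equal_simN := by
  intro y x moves _ hpre
  unfold Spec_simN simN simN_alt
  refine simN_go_eq_path moves.toList y x ?_
  intro c hc
  have h := List.all_eq_true.mp hpre c hc
  simp only [Bool.or_eq_true, beq_iff_eq] at h
  tauto
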